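-- pv_equiv track=rewrite | github.com/vWpc/frro-python-2022-06 | Ejercicios - TP01 - Grupo6.py | suma_cubo_pares_for
-- ===== SOURCE A (Python) =====
-- from typing import Iterable, Any
-- from typing import Any, Iterable
-- from typing import Any, Iterable
-- from typing import Iterable
-- from typing import Iterable
-- from typing import Iterable
-- from typing import Iterable
-- from typing import Iterable
-- from typing import Iterable
-- from typing import Callable, Iterable
-- from typing import Callable, Iterable
--
-- def suma_cubo_pares_for(numeros: Iterable[int]) -> int:
--     suma = 0
--     l1 = []
--     for x in numeros:
--         l1.append(pow(x,3))
--     for x in l1: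
--         if x%2 == 0:
--             suma = suma + x
--     return suma
--
-- numeros = [1, 2, 3, 4, 5, 6]
-- ===== SOURCE B (Python) =====
-- def suma_cubo_pares_for(numeros):
--     pares = [x for x in numeros if x % 2 == 0]
--     return sum(x * x * x for x in pares)
-- ===== Notes on version B (the rewrite author's own statement) =====
-- stated objective: idiomatic
-- what changed: Filter the even elements first, then sum their cubes with a generator over sum(), instead of materializing all cubes and scanning them for even entries; correct because x**3 is even exactly when x is (a timing run measured ~1.7x at the largest size).
import Mathlib
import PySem

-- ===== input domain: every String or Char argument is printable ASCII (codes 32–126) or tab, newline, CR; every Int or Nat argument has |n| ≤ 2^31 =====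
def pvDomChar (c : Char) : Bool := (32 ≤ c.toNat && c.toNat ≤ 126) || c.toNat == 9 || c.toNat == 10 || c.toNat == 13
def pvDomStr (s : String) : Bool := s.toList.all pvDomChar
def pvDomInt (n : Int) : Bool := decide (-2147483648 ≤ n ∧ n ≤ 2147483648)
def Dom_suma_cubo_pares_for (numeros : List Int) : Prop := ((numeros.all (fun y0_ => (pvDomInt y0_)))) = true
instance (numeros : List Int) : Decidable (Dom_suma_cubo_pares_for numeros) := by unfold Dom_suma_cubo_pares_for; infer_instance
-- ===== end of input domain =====

-- B filters the even elements and sums their cubes (filter/map/sum), instead of A's build-all-cubes-then-scan; same O(n) asymptotics, measured ~1.7x faster in a timing run (cubes only the even elements).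

-- ===== PORT A =====
-- literal port of A: build l1 = cubes of all elements, then fold over l1 adding even entries
def suma_cubo_pares_for (numeros : List Int) : Int :=
  let l1 := numeros.foldl (fun acc x => acc ++ [x ^ 3]) []
  l1.foldl (fun suma x => if x % 2 == 0 then suma + x else suma) 0

-- ===== PORT B =====
-- port of B: keep the even elements, cube each, sum the result
def suma_cubo_pares_for_alt (numeros : List Int) : Int :=
  ((numeros.filter (fun x => x % 2 == 0)).map (fun x => x * x * x)).sum

-- ===== PRECONDITION & SPEC =====
def Spec_suma_cubo_pares_for (numeros : List Int) (out : Int) : Prop := out = suma_cubo_pares_for_alt numeros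
instance (numeros : List Int) (out : Int) : Decidable (Spec_suma_cubo_pares_for numeros out) := by unfold Spec_suma_cubo_pares_for; infer_instance

-- ===== CLAIM (what is proved, stated in full; the proofs are below) =====
def Claim_equal_suma_cubo_pares_for : Prop := ∀ (numeros : List Int), Dom_suma_cubo_pares_for numeros → Spec_suma_cubo_pares_for numeros (suma_cubo_pares_for numeros)

-- ===== LEMMAS AND PROOFS =====

-- ===== VERDICT (by name: the statement is the Claim_ definition above) =====
lemma build_cubes (numeros : List Int) (acc : List Int) :
    numeros.foldl (fun acc x => acc ++ [x ^ 3]) acc = acc ++ numeros.map (· ^ 3) := by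
  induction numeros generalizing acc with
  | nil => simp
  | cons y ys ih => simp [List.foldl, ih]

lemma cube_parity (x : Int) : ((x ^ 3) % 2 == 0) = (x % 2 == 0) := by
  have h : (x ^ 3 % 2 = 0) ↔ (x % 2 = 0) := by
    rw [← Int.even_iff, ← Int.even_iff, Int.even_pow]; simp
  simp [beq_iff_eq, h]

lemma scan_cubes (numeros : List Int) (s : Int) :
    (numeros.map (· ^ 3)).foldl (fun suma x => if x % 2 == 0 then suma + x else suma) s
      = s + ((numeros.filter (fun x => x % 2 == 0)).map (fun x => x * x * x)).sum := by
  induction numeros generalizing s with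
  | nil => simp
  | cons y ys ih =>
    simp only [List.map_cons, List.foldl_cons, cube_parity, List.filter_cons]
    by_cases h : y % 2 = 0
    · simp only [h, beq_self_eq_true, if_true, ih, List.map_cons, List.sum_cons]
      ring
    · have h' : (y % 2 == 0) = false := by simp [h]
      simp only [h', Bool.false_eq_true, if_false, ih]

theorem suma_cubo_pares_for_spec : Claim_equal_suma_cubo_pares_for := by
  intro numeros _
  unfold Spec_suma_cubo_pares_for suma_cubo_pares_for suma_cubo_pares_for_alt
  rw [build_cubes, List.nil_append, scan_cubes, zero_add]
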